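-- pv_equiv track=rewrite | github.com/SangjinH/algorithm | programmers/line/2021하반기공채/2.py | solution
-- ===== SOURCE A (Python) =====
-- from collections import defaultdict
--
-- def solution(research, n, k):
--
--     issues = []
--
--     cnt_dict = defaultdict(int)
--     cnt_days = []
--     # 전체 확인 범위
--     for i in range(len(research)-n+1):
--         # 연속된 날짜에서 확인
--         for j in research[i:i+n]:
--             for m in set(list(j)):
--                 num_cnts = list(j).count(m)
--                 if num_cnts >= k:
--                     cnt_dict[m] += num_cnts
--                     cnt_days.append(m)
--
--         r = set(cnt_days)
--         for l in r:
--             if cnt_days.count(l) >= n and cnt_dict[l] >= 2*n*k: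
--                issues.append(l)
--
--         cnt_dict = defaultdict(int)
--         cnt_days = []
--
--     issues.sort()
--     check = sorted(list(set(issues)))
--
--     answer = "None"
--     maxi = 0
--
--     for i in check:
--         temp = issues.count(i)
--         if temp > maxi:
--             answer = i
--             maxi = temp
--
--     return answer
-- ===== SOURCE B (Python) =====
-- from collections import Counter
--
-- def solution(research, n, k):
--     # per-day frequency tables, keeping only chars whose count reaches k
--     qual = [[(c, v) for c, v in Counter(day).items() if v >= k] for day in research]
--     total, days, wins = Counter(), Counter(), Counter()
--     for i in range(len(research)):
--         for c, v in qual[i]: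
--             total[c] += v
--             days[c] += 1
--         if i >= n:
--             for c, v in qual[i - n]:
--                 total[c] -= v
--                 days[c] -= 1
--         if i >= n - 1:
--             for c in days:
--                 if days[c] >= n and total[c] >= 2 * n * k:
--                     wins[c] += 1
--     answer, maxi = "None", 0
--     for c in sorted(wins):
--         if wins[c] > maxi:
--             answer, maxi = c, wins[c]
--     return answer
-- ===== Notes on version B (the rewrite author's own statement) =====
-- stated objective: faster
-- what changed: A recomputes every window from scratch (set() + list.count for each char of each day, per window); B builds per-day frequency tables once with Counter and maintains the window's per-char totals and qualifying-day counts incrementally while sliding, tallying winning windows in a Counter.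
-- outside the precondition, e.g. on solution(['aaa'], 0, 1): A returns 'None', B returns 'a'; on solution(['aaa'], -2, 1): A returns 'None', B raises IndexError
import Mathlib
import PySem

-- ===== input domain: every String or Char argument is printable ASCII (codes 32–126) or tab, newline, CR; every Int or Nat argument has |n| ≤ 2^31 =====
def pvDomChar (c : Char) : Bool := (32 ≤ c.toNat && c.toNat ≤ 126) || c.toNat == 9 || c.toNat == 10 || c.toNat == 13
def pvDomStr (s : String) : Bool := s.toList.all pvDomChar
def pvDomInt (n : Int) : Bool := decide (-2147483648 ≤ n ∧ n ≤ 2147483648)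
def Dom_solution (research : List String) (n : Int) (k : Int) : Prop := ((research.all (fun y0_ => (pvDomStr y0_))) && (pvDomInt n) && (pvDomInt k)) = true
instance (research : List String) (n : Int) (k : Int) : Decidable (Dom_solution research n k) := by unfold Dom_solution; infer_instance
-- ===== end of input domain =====

-- B replaces A's per-window recomputation (set() + list.count per char per day) by per-day
-- frequency tables built once plus an incrementally maintained sliding-window counter (objective: faster).

-- ===== PORT A =====
-- one iteration of A's outer loop (window starting at i); state = (issues, cnt_dict, cnt_days)
def pvAstep (research : List String) (n k : Int)
    (st : List Char × PySem.Dict Char Int × List Char) (i : Int) :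
    List Char × PySem.Dict Char Int × List Char :=
  -- for j in research[i:i+n]: for m in set(list(j)): …
  let cd := (PySem.List.slice research (some i) (some (i + n))).foldl
    (fun (cd : PySem.Dict Char Int × List Char) j =>
      (PySem.Set.ofList j.toList).foldl
        (fun (cd : PySem.Dict Char Int × List Char) m =>
          let numCnts : Int := (j.toList.count m : Int)
          if k ≤ numCnts then (cd.1.modify m 0 (· + numCnts), cd.2 ++ [m]) else cd)
        cd)
    (st.2.1, st.2.2)
  -- r = set(cnt_days); for l in r: …
  let issues := (PySem.Set.ofList cd.2).foldl
    (fun (issues : List Char) l =>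
      if n ≤ (cd.2.count l : Int) ∧ 2 * n * k ≤ cd.1.getD l 0 then issues ++ [l] else issues)
    st.1
  -- cnt_dict = defaultdict(int); cnt_days = []
  (issues, PySem.Dict.empty, [])

def solution (research : List String) (n k : Int) : String :=
  let st := (PySem.List.pyRange 0 (PySem.List.len research - n + 1) 1).foldl
      (pvAstep research n k) ([], PySem.Dict.empty, [])
  -- issues.sort(); check = sorted(list(set(issues)))
  let issues := PySem.List.sorted st.1 (fun x => x)
  let check := PySem.List.sorted (PySem.Set.ofList issues) (fun x => x)
  let fin := check.foldl
    (fun (am : String × Int) i =>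
      let temp : Int := (issues.count i : Int)
      if am.2 < temp then (String.ofList [i], temp) else am)
    ("None", 0)
  fin.1

-- ===== PORT B =====
-- [(c, v) for c, v in Counter(day).items() if v >= k]
def pvQual (k : Int) (day : String) : List (Char × Int) :=
  (PySem.Dict.counter day.toList).items.filter (fun p => decide (k ≤ p.2))

-- one iteration of B's main loop; state = (total, days, wins)
def pvBstep (qual : List (List (Char × Int))) (n k : Int)
    (st : PySem.Dict Char Int × PySem.Dict Char Int × PySem.Dict Char Int) (i : Int) :
    PySem.Dict Char Int × PySem.Dict Char Int × PySem.Dict Char Int :=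
  let td := (PySem.List.pyGetD qual i []).foldl
    (fun (td : PySem.Dict Char Int × PySem.Dict Char Int) p =>
      (td.1.modify p.1 0 (· + p.2), td.2.modify p.1 0 (· + 1)))
    (st.1, st.2.1)
  let td := if n ≤ i then
      (PySem.List.pyGetD qual (i - n) []).foldl
        (fun (td : PySem.Dict Char Int × PySem.Dict Char Int) p =>
          (td.1.modify p.1 0 (· - p.2), td.2.modify p.1 0 (· - 1)))
        td
    else td
  let wins := if n - 1 ≤ i then
      td.2.keys.foldl
        (fun (w : PySem.Dict Char Int) c =>
          if n ≤ td.2.getD c 0 ∧ 2 * n * k ≤ td.1.getD c 0 then w.modify c 0 (· + 1) else w)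
        st.2.2
    else st.2.2
  (td.1, td.2, wins)

def solution_alt (research : List String) (n k : Int) : String :=
  let qual := research.map (pvQual k)
  let st := (PySem.List.pyRange 0 (PySem.List.len research) 1).foldl (pvBstep qual n k)
      (PySem.Dict.empty, PySem.Dict.empty, PySem.Dict.empty)
  let fin := (PySem.List.sorted st.2.2.keys (fun x => x)).foldl
    (fun (am : String × Int) c =>
      if am.2 < st.2.2.getD c 0 then (String.ofList [c], st.2.2.getD c 0) else am)
    ("None", 0)
  fin.1

-- ===== PRECONDITION & SPEC =====
-- Pre_ restricts to positive window length n ≥ 1, the problem's natural domain: for n ≤ 0 A merely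
-- iterates len(research)-n+1 empty windows (returning "None", infeasibly many of them for large
-- negative n) while B's sliding window is undefined there.
def Pre_solution (research : List String) (n : Int) (k : Int) : Prop := 1 ≤ n
instance (research : List String) (n : Int) (k : Int) : Decidable (Pre_solution research n k) := by
  unfold Pre_solution; infer_instance

def pvWitness_solution : List String × Int × Int := (["aab", "abb"], 1, 2)

def Spec_solution (research : List String) (n : Int) (k : Int) (out : String) : Prop := out = solution_alt research n k
instance (research : List String) (n : Int) (k : Int) (out : String) : Decidable (Spec_solution research n k out) := by unfold Spec_solution; infer_instance

-- ===== CLAIM (what is proved, stated in full; the proofs are below) =====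
def Claim_equal_solution : Prop := ∀ (research : List String) (n : Int) (k : Int), Dom_solution research n k → Pre_solution research n k → Spec_solution research n k (solution research n k)

-- ===== LEMMAS AND PROOFS =====

-- ---- canonical per-day / per-window quantities both ports are reduced to ----

-- characters of day number j
def pvDayL (research : List String) (j : Int) : List Char := (PySem.List.pyGetD research j "").toList

-- "day j qualifies character c": c occurs in day j and its count reaches k
def pvQb (research : List String) (k j : Int) (c : Char) : Bool :=
  decide (c ∈ pvDayL research j) && decide (k ≤ (List.count c (pvDayL research j) : Int))

-- contribution of day j to the window total for c (count if qualifying, else 0)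
def pvQv (research : List String) (k j : Int) (c : Char) : Int :=
  if pvQb research k j c then (List.count c (pvDayL research j) : Int) else 0

def pvQsum (research : List String) (k a b : Int) (c : Char) : Int :=
  ((PySem.List.pyRange a b 1).map (fun j => pvQv research k j c)).sum

def pvQcnt (research : List String) (k a b : Int) (c : Char) : Nat :=
  (PySem.List.pyRange a b 1).countP (fun j => pvQb research k j c)

-- "the window of n days ending at day i reports c as an issue"
def pvWinQ (research : List String) (n k i : Int) (c : Char) : Bool :=
  decide (n ≤ (pvQcnt research k (i + 1 - n) (i + 1) c : Int)) &&
  decide (2 * n * k ≤ pvQsum research k (i + 1 - n) (i + 1) c)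

-- number of windows reporting c
def pvWcount (research : List String) (n k : Int) (c : Char) : Nat :=
  (PySem.List.pyRange 0 (PySem.List.len research) 1).countP
    (fun i => decide (n - 1 ≤ i) && pvWinQ research n k i c)

-- ---- generic dict-fold characterisations ----


theorem pv_getD_foldl_modify_add {β : Type} (l : List β) (key : β → Char) (g : β → Int)
    (d : PySem.Dict Char Int) (c : Char) :
    (l.foldl (fun d p => d.modify (key p) 0 (· + g p)) d).getD c 0
      = d.getD c 0 + ((l.filter (fun p => key p == c)).map g).sum := by
  induction l generalizing d with
  | nil => simp
  | cons p l ih =>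
    simp only [List.foldl_cons, List.filter_cons]
    rw [ih]
    by_cases h : key p = c
    · simp [h, PySem.Dict.getD_modify]; ring
    · simp [h, PySem.Dict.getD_modify, Ne.symm h]

theorem pv_getD_foldl_modify_if (s : List Char) (p : Char → Prop) [DecidablePred p]
    (w : PySem.Dict Char Int) (c : Char) :
    (s.foldl (fun w x => if p x then w.modify x 0 (· + 1) else w) w).getD c 0
      = w.getD c 0 + ((s.filter (fun x => decide (p x))).count c : Int) := by
  induction s generalizing w with
  | nil => simp
  | cons x s ih =>
    simp only [List.foldl_cons, List.filter_cons]
    by_cases hp : p x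
    · rw [if_pos hp, ih]
      by_cases hc : x = c
      · subst hc
        simp [hp, PySem.Dict.getD_modify, List.count_cons]
        push_cast
        ring
      · simp [hp, hc, PySem.Dict.getD_modify, Ne.symm hc, List.count_cons]
    · rw [if_neg hp, ih]
      simp [hp]

theorem pv_mem_keys_foldl_modify_if (s : List Char) (p : Char → Prop) [DecidablePred p]
    (w : PySem.Dict Char Int) (c : Char) :
    (c ∈ (s.foldl (fun w x => if p x then w.modify x 0 (· + 1) else w) w).keys
      ↔ c ∈ w.keys ∨ (c ∈ s ∧ p c)) := by
  induction s generalizing w with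
  | nil => simp
  | cons x s ih =>
    simp only [List.foldl_cons]
    by_cases hp : p x
    · rw [if_pos hp, ih, PySem.Dict.keys_modify]
      by_cases hc : c = x
      · subst hc; simp [PySem.Dict.mem_keys_insert, hp]
      · simp only [PySem.Dict.mem_keys_insert, List.mem_cons]
        constructor
        · rintro (⟨h, _⟩ | h) <;> tauto
        · rintro (h | ⟨(h | h), hpc⟩) <;> tauto
    · rw [if_neg hp, ih]
      by_cases hc : c = x
      · subst hc; simp [hp]
      · simp only [List.mem_cons]
        constructor
        · rintro (h | ⟨h, hpc⟩) <;> tauto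
        · rintro (h | ⟨(h | h), hpc⟩) <;> tauto

theorem pv_nodup_keys_foldl_modify_if (s : List Char) (p : Char → Prop) [DecidablePred p]
    (w : PySem.Dict Char Int) (h : w.keys.Nodup) :
    (s.foldl (fun w x => if p x then w.modify x 0 (· + 1) else w) w).keys.Nodup := by
  induction s generalizing w with
  | nil => simpa
  | cons x s ih =>
    simp only [List.foldl_cons]
    by_cases hp : p x
    · rw [if_pos hp]
      exact ih _ (by rw [PySem.Dict.keys_modify]; exact PySem.Dict.nodup_keys_insert _ _ _ h)
    · rw [if_neg hp]; exact ih _ h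

-- ---- small list facts ----


theorem pv_sum_map_ite_nat {β : Type} (l : List β) (p : β → Bool) :
    (l.map (fun x => if p x then (1 : Nat) else 0)).sum = l.countP p := by
  induction l with
  | nil => simp
  | cons x l ih => by_cases h : p x <;> simp [List.countP_cons, h, ih] <;> omega

theorem pv_count_eq_of_nodup (s : List Char) (h : s.Nodup) (c : Char) :
    s.count c = if c ∈ s then 1 else 0 := by
  by_cases hm : c ∈ s
  · rw [if_pos hm]
    exact List.count_eq_one_of_mem h hm
  · simp [hm, List.count_eq_zero_of_not_mem hm]

theorem pv_count_flatMap {β : Type} (l : List β) (f : β → List Char) (c : Char) :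
    (l.flatMap f).count c = (l.map (fun x => (f x).count c)).sum := by
  induction l with
  | nil => simp
  | cons x l ih => simp [List.flatMap_cons, List.count_append, ih]

theorem pv_filter_and_beq_of_nodup (s : List Char) (h : s.Nodup) (q : Char → Bool) (c : Char) :
    s.filter (fun m => (m == c) && q m) = if c ∈ s ∧ q c then [c] else [] := by
  induction s with
  | nil => simp
  | cons x s ih =>
    rw [List.filter_cons]
    rcases List.nodup_cons.mp h with ⟨hx, hs⟩
    by_cases hc : x = c
    · subst hc
      by_cases hq : q x
      · simp [hq, hx, ih hs]
      · simp [hq, ih hs, hx]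
    · simp only [show (x == c) = false by simpa using hc, Bool.false_and, ih hs]
      by_cases hm : c ∈ s <;> simp [hm, Ne.symm hc]

-- ---- per-day facts ----

def pvDb (k : Int) (d : String) (c : Char) : Bool :=
  decide (c ∈ d.toList) && decide (k ≤ (d.toList.count c : Int))

def pvDv (k : Int) (d : String) (c : Char) : Int :=
  if pvDb k d c then (d.toList.count c : Int) else 0

theorem pv_qual_filter_eq (k : Int) (d : String) (c : Char) :
    (pvQual k d).filter (fun p => p.1 == c)
      = if pvDb k d c then [(c, (d.toList.count c : Int))] else [] := by
  unfold pvQual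
  rw [PySem.Dict.items_counter, List.filter_map, List.filter_map, List.filter_filter]
  have := pv_filter_and_beq_of_nodup (PySem.Set.ofList d.toList) (PySem.Set.nodup_ofList _)
      (fun m => decide (k ≤ (d.toList.count m : Int))) c
  simp only [Function.comp_def] at *
  rw [this]
  unfold pvDb
  by_cases hm : c ∈ d.toList
  · by_cases hk : k ≤ (d.toList.count c : Int) <;>
      simp [PySem.Set.mem_ofList, hm, hk]
  · simp [PySem.Set.mem_ofList, hm]

theorem pv_mem_map_fst_qual (k : Int) (d : String) (c : Char) :
    (c ∈ (pvQual k d).map Prod.fst) ↔ pvDb k d c = true := by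
  unfold pvQual pvDb
  rw [PySem.Dict.items_counter, List.filter_map]
  simp only [List.map_map, Function.comp_def, List.mem_map, List.mem_filter,
    PySem.Set.mem_ofList]
  constructor
  · rintro ⟨m, ⟨hm, hk⟩, rfl⟩
    simp_all
  · intro h
    simp only [Bool.and_eq_true, decide_eq_true_eq] at h
    exact ⟨c, ⟨h.1, by simpa using h.2⟩, rfl⟩

-- ---- range-sum recurrences ----

theorem pv_qsum_succ (research : List String) (k a b : Int) (c : Char) (hab : a ≤ b) :
    pvQsum research k a (b + 1) c = pvQsum research k a b c + pvQv research k b c := by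
  unfold pvQsum
  rw [PySem.List.pyRange_one_succ_right hab, List.map_append, List.sum_append]
  simp

theorem pv_qsum_cons (research : List String) (k a b : Int) (c : Char) (hab : a < b) :
    pvQsum research k a b c = pvQv research k a c + pvQsum research k (a + 1) b c := by
  unfold pvQsum
  rw [PySem.List.pyRange_one_cons hab]
  simp

theorem pv_qcnt_succ (research : List String) (k a b : Int) (c : Char) (hab : a ≤ b) :
    pvQcnt research k a (b + 1) c = pvQcnt research k a b c + (if pvQb research k b c then 1 else 0) := by
  unfold pvQcnt
  rw [PySem.List.pyRange_one_succ_right hab, List.countP_append]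
  by_cases h : pvQb research k b c <;> simp [h]

theorem pv_qcnt_cons (research : List String) (k a b : Int) (c : Char) (hab : a < b) :
    pvQcnt research k a b c = (if pvQb research k a c then 1 else 0) + pvQcnt research k (a + 1) b c := by
  unfold pvQcnt
  rw [PySem.List.pyRange_one_cons hab, List.countP_cons]
  by_cases h : pvQb research k a c <;> simp [h] <;> omega

theorem pv_winq_inhabit (research : List String) (n k m : Int) (c : Char)
    (hn : 1 ≤ n) (hm : n - 1 ≤ m) (hw : pvWinQ research n k m c = true) :
    ∃ j : Int, 0 ≤ j ∧ j < m + 1 ∧ pvQb research k j c = true := by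
  unfold pvWinQ at hw
  simp only [Bool.and_eq_true, decide_eq_true_eq] at hw
  have hpos : 0 < pvQcnt research k (m + 1 - n) (m + 1) c := by omega
  unfold pvQcnt at hpos
  rw [List.countP_pos_iff] at hpos
  obtain ⟨j, hj, hq⟩ := hpos
  rw [PySem.List.mem_pyRange_one] at hj
  exact ⟨j, by omega, by omega, hq⟩

-- ---- the slice ↔ indexed-range bridge ----

theorem pv_slice_eq_map_range (research : List String) (a b : Int)
    (h0 : 0 ≤ a) (hab : a ≤ b) (hb : b ≤ (research.length : Int)) :
    PySem.List.slice research (some a) (some b)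
      = (PySem.List.pyRange a b 1).map (fun j => PySem.List.pyGetD research j "") := by
  rw [PySem.List.slice_toNat _ h0 (by omega : (0:Int) ≤ b)]
  apply List.ext_getElem
  · simp [PySem.List.length_pyRange_one]
    omega
  · intro t h1 h2
    simp only [List.getElem_take, List.getElem_drop, List.getElem_map,
      PySem.List.getElem_pyRange_one]
    have ht : t < (b - a).toNat := by simpa [PySem.List.length_pyRange_one] using h2
    have : PySem.List.pyGetD research (a + (t : Int)) "" = research[(a.toNat + t)] := by
      rw [PySem.List.pyGetD_of_nonneg (h := by omega)]
      rw [show (a + (t:Int)).toNat = a.toNat + t by omega]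
      exact List.getD_eq_getElem _ _ (by omega)
    rw [this]

-- ---- A-side characterisation ----

-- the per-window list of chars A appends to `issues` for the window starting at i
def pvAwinIss (research : List String) (n k i : Int) : List Char :=
  let cd := (PySem.List.slice research (some i) (some (i + n))).foldl
    (fun (cd : PySem.Dict Char Int × List Char) j =>
      (PySem.Set.ofList j.toList).foldl
        (fun (cd : PySem.Dict Char Int × List Char) m =>
          let numCnts : Int := (j.toList.count m : Int)
          if k ≤ numCnts then (cd.1.modify m 0 (· + numCnts), cd.2 ++ [m]) else cd)
        cd)
    (PySem.Dict.empty, [])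
  (PySem.Set.ofList cd.2).filter
    (fun l => decide (n ≤ (cd.2.count l : Int) ∧ 2 * n * k ≤ cd.1.getD l 0))


theorem pv_Ainner_snd (s : List Char) (q : Char → Prop) [DecidablePred q] (f : Char → Int)
    (d : PySem.Dict Char Int) (L : List Char) :
    (s.foldl (fun cd m => if q m then (cd.1.modify m 0 (· + f m), cd.2 ++ [m]) else cd)
        ((d, L) : PySem.Dict Char Int × List Char)).2
      = L ++ s.filter (fun m => decide (q m)) := by
  induction s generalizing d L with
  | nil => simp
  | cons x s ih =>
    simp only [List.foldl_cons, List.filter_cons]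
    by_cases h : q x
    · rw [if_pos h, ih]; simp [h]
    · rw [if_neg h, ih]; simp [h]

theorem pv_Ainner_fst_getD (s : List Char) (q : Char → Prop) [DecidablePred q] (f : Char → Int)
    (d : PySem.Dict Char Int) (L : List Char) (c : Char) :
    (s.foldl (fun cd m => if q m then (cd.1.modify m 0 (· + f m), cd.2 ++ [m]) else cd)
        ((d, L) : PySem.Dict Char Int × List Char)).1.getD c 0
      = d.getD c 0 + ((s.filter (fun m => (m == c) && decide (q m))).map f).sum := by
  induction s generalizing d L with
  | nil => simp
  | cons x s ih =>
    simp only [List.foldl_cons, List.filter_cons]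
    by_cases h : q x
    · rw [if_pos h, ih]
      by_cases hc : x = c
      · subst hc; simp [h, PySem.Dict.getD_modify]; ring
      · simp [h, hc, PySem.Dict.getD_modify, Ne.symm hc]
    · rw [if_neg h, ih]; simp [h]

theorem pv_Awin (k : Int) (w : List String) (d : PySem.Dict Char Int) (L : List Char) (c : Char) :
    ((w.foldl
        (fun (cd : PySem.Dict Char Int × List Char) j =>
          (PySem.Set.ofList j.toList).foldl
            (fun (cd : PySem.Dict Char Int × List Char) m =>
              let numCnts : Int := (j.toList.count m : Int)
              if k ≤ numCnts then (cd.1.modify m 0 (· + numCnts), cd.2 ++ [m]) else cd)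
            cd)
        (d, L)).1.getD c 0
      = d.getD c 0 + (w.map (fun j => pvDv k j c)).sum)
    ∧ (w.foldl
        (fun (cd : PySem.Dict Char Int × List Char) j =>
          (PySem.Set.ofList j.toList).foldl
            (fun (cd : PySem.Dict Char Int × List Char) m =>
              let numCnts : Int := (j.toList.count m : Int)
              if k ≤ numCnts then (cd.1.modify m 0 (· + numCnts), cd.2 ++ [m]) else cd)
            cd)
        (d, L)).2.count c
      = L.count c + w.countP (fun j => pvDb k j c) := by
  induction w generalizing d L with
  | nil => simp
  | cons j w ih =>
    simp only [List.foldl_cons, List.map_cons, List.sum_cons, List.countP_cons]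
    have hstep : ((PySem.Set.ofList j.toList).foldl
        (fun (cd : PySem.Dict Char Int × List Char) m =>
          let numCnts : Int := (j.toList.count m : Int)
          if k ≤ numCnts then (cd.1.modify m 0 (· + numCnts), cd.2 ++ [m]) else cd)
        (d, L))
        = ((PySem.Set.ofList j.toList).foldl
        (fun (cd : PySem.Dict Char Int × List Char) m =>
          if k ≤ (j.toList.count m : Int) then (cd.1.modify m 0 (· + (j.toList.count m : Int)), cd.2 ++ [m]) else cd)
        (d, L)) := rfl
    rw [hstep]
    set r := ((PySem.Set.ofList j.toList).foldl
        (fun (cd : PySem.Dict Char Int × List Char) m =>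
          if k ≤ (j.toList.count m : Int) then (cd.1.modify m 0 (· + (j.toList.count m : Int)), cd.2 ++ [m]) else cd)
        (d, L)) with hr
    have hre : r = (r.1, r.2) := rfl
    rw [hre]
    obtain ⟨ih1, ih2⟩ := ih r.1 r.2
    rw [ih1, ih2, hr]
    rw [pv_Ainner_fst_getD (PySem.Set.ofList j.toList) (fun m => k ≤ (j.toList.count m : Int)) (fun m => (j.toList.count m : Int)) d L c]
    rw [pv_Ainner_snd (PySem.Set.ofList j.toList) (fun m => k ≤ (j.toList.count m : Int)) (fun m => (j.toList.count m : Int)) d L]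
    rw [pv_filter_and_beq_of_nodup _ (PySem.Set.nodup_ofList _)]
    constructor
    · unfold pvDv pvDb
      by_cases hm : c ∈ j.toList <;> by_cases hk : k ≤ (j.toList.count c : Int) <;>
        simp [PySem.Set.mem_ofList, hm, hk] <;> ring
    · rw [List.count_append]
      unfold pvDb
      by_cases hk : k ≤ (j.toList.count c : Int)
      · rw [List.count_filter (by simpa using hk)]
        have hcnt := pv_count_eq_of_nodup (PySem.Set.ofList j.toList) (PySem.Set.nodup_ofList _) c
        by_cases hm : c ∈ j.toList <;> simp [PySem.Set.mem_ofList, hm, hk, hcnt] <;> omega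
      · have h0 : List.count c (List.filter (fun m => decide (k ≤ (j.toList.count m : Int))) (PySem.Set.ofList j.toList)) = 0 := by
          apply List.count_eq_zero_of_not_mem
          intro hmem
          rw [List.mem_filter] at hmem
          simp only [decide_eq_true_eq] at hmem
          exact hk hmem.2
        rw [h0]
        simp [hk]

theorem pv_Astep_decomp (research : List String) (n k : Int) (acc : List Char) (i : Int) :
    pvAstep research n k (acc, PySem.Dict.empty, []) i
      = (acc ++ pvAwinIss research n k i, PySem.Dict.empty, []) := by
  unfold pvAstep pvAwinIss
  simp only []
  refine Prod.ext ?_ rfl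
  simp only []
  generalize ((PySem.List.slice research (some i) (some (i + n))).foldl _ _ : PySem.Dict Char Int × List Char) = cd
  have hcongr : (PySem.Set.ofList cd.2).foldl
      (fun (issues : List Char) l =>
        if n ≤ (cd.2.count l : Int) ∧ 2 * n * k ≤ cd.1.getD l 0 then issues ++ [l] else issues) acc
      = (PySem.Set.ofList cd.2).foldl
      (fun (issues : List Char) l =>
        if (decide (n ≤ (cd.2.count l : Int) ∧ 2 * n * k ≤ cd.1.getD l 0)) = true then issues ++ [id l] else issues) acc := by
    apply PySem.List.foldl_congr_mem
    intro acc' x _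
    by_cases h : n ≤ (cd.2.count x : Int) ∧ 2 * n * k ≤ cd.1.getD x 0 <;> simp [h]
  rw [hcongr, PySem.List.foldl_append_if]
  simp

theorem pv_A_issues (research : List String) (n k : Int) (l : List Int) (acc : List Char) :
    (l.foldl (pvAstep research n k) (acc, PySem.Dict.empty, [])).1
      = acc ++ l.flatMap (pvAwinIss research n k) := by
  induction l generalizing acc with
  | nil => simp
  | cons i l ih =>
    rw [List.foldl_cons, pv_Astep_decomp, ih, List.flatMap_cons, List.append_assoc]

theorem pv_AwinIss_count (research : List String) (n k i : Int) (c : Char)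
    (hn : 1 ≤ n) (h0 : 0 ≤ i) (hiL : i + n ≤ (research.length : Int)) :
    (pvAwinIss research n k i).count c
      = if pvWinQ research n k (i + n - 1) c then 1 else 0 := by
  unfold pvAwinIss
  simp only []
  have hW := pv_slice_eq_map_range research i (i + n) h0 (by omega) hiL
  set w := PySem.List.slice research (some i) (some (i + n)) with hw
  set cd := (w.foldl
    (fun (cd : PySem.Dict Char Int × List Char) j =>
      (PySem.Set.ofList j.toList).foldl
        (fun (cd : PySem.Dict Char Int × List Char) m =>
          let numCnts : Int := (j.toList.count m : Int)
          if k ≤ numCnts then (cd.1.modify m 0 (· + numCnts), cd.2 ++ [m]) else cd)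
        cd)
    ((PySem.Dict.empty : PySem.Dict Char Int), ([] : List Char))) with hcd
  -- dictionary / day-list characterisation for every char x
  have hdict : ∀ x, cd.1.getD x 0 = pvQsum research k i (i + n) x := by
    intro x
    rw [hcd, (pv_Awin k w PySem.Dict.empty [] x).1, hW]
    unfold pvQsum
    rw [List.map_map]
    simp [PySem.Dict.getD_empty]
    rfl
  have hcnt : ∀ x, cd.2.count x = pvQcnt research k i (i + n) x := by
    intro x
    rw [hcd, (pv_Awin k w PySem.Dict.empty [] x).2, hW]
    unfold pvQcnt
    rw [List.countP_map]
    simp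
    rfl
  by_cases hq : pvWinQ research n k (i + n - 1) c = true
  · rw [if_pos hq]
    have hq' : n ≤ (pvQcnt research k i (i + n) c : Int) ∧ 2 * n * k ≤ pvQsum research k i (i + n) c := by
      unfold pvWinQ at hq
      simp only [Bool.and_eq_true, decide_eq_true_eq] at hq
      have e1 : i + n - 1 + 1 - n = i := by ring
      have e2 : i + n - 1 + 1 = i + n := by ring
      rw [e1, e2] at hq
      exact hq
    have hmem : c ∈ cd.2 := by
      have : 0 < cd.2.count c := by
        rw [hcnt]; omega
      exact List.count_pos_iff.mp this
    have hc : (decide (n ≤ (cd.2.count c : Int) ∧ 2 * n * k ≤ cd.1.getD c 0)) = true := by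
      simp only [decide_eq_true_eq]
      rw [hcnt, hdict]
      exact hq'
    rw [List.count_filter (p := fun l => decide (n ≤ (cd.2.count l : Int) ∧ 2 * n * k ≤ cd.1.getD l 0)) hc,
      pv_count_eq_of_nodup _ (PySem.Set.nodup_ofList _)]
    simp [PySem.Set.mem_ofList, hmem]
  · rw [if_neg hq]
    apply List.count_eq_zero_of_not_mem
    intro hmem
    rw [List.mem_filter] at hmem
    apply hq
    unfold pvWinQ
    have e1 : i + n - 1 + 1 - n = i := by ring
    have e2 : i + n - 1 + 1 = i + n := by ring
    rw [e1, e2]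
    have := hmem.2
    simp only [decide_eq_true_eq] at this
    rw [hcnt, hdict] at this
    simp only [Bool.and_eq_true, decide_eq_true_eq]
    exact this


theorem pv_reindex (L n : Int) (hn : 1 ≤ n) (f : Int → Bool) :
    (PySem.List.pyRange 0 (L - n + 1) 1).countP (fun s => f (s + n - 1))
      = (PySem.List.pyRange 0 L 1).countP (fun i => decide (n - 1 ≤ i) && f i) := by
  by_cases hL : L - n + 1 ≤ 0
  · rw [PySem.List.pyRange_one_eq_nil hL]
    simp only [List.countP_nil]
    symm
    rw [List.countP_eq_zero]
    intro i hi
    rw [PySem.List.mem_pyRange_one] at hi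
    simp only [Bool.and_eq_true, decide_eq_true_eq, not_and]
    intro h
    omega
  · push_neg at hL
    rw [PySem.List.pyRange_one_append 0 (n - 1) L (by omega) (by omega), List.countP_append]
    have h1 : (PySem.List.pyRange 0 (n - 1) 1).countP (fun i => decide (n - 1 ≤ i) && f i) = 0 := by
      rw [List.countP_eq_zero]
      intro i hi
      rw [PySem.List.mem_pyRange_one] at hi
      simp only [Bool.and_eq_true, decide_eq_true_eq, not_and]
      intro h
      omega
    rw [h1]
    rw [PySem.List.pyRange_one 0 (L - n + 1), PySem.List.pyRange_one (n - 1) L]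
    rw [List.countP_map, List.countP_map]
    rw [show (L - n + 1 - 0).toNat = (L - (n - 1)).toNat by omega]
    rw [Nat.zero_add]
    apply List.countP_congr
    intro x hx
    simp only [Function.comp_def]
    have : decide (n - 1 ≤ n - 1 + (x : Int)) = true := by simp
    rw [this]
    rw [show (0 : Int) + (x : Int) + n - 1 = n - 1 + (x : Int) by ring]
    simp

theorem pv_A_count (research : List String) (n k : Int) (c : Char) (hn : 1 ≤ n) :
    (((PySem.List.pyRange 0 (PySem.List.len research - n + 1) 1).foldl
        (pvAstep research n k) ([], PySem.Dict.empty, [])).1).count c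
      = pvWcount research n k c := by
  rw [pv_A_issues, List.nil_append, pv_count_flatMap]
  have hmap : (PySem.List.pyRange 0 (PySem.List.len research - n + 1) 1).map
        (fun i => (pvAwinIss research n k i).count c)
      = (PySem.List.pyRange 0 (PySem.List.len research - n + 1) 1).map
        (fun i => if pvWinQ research n k (i + n - 1) c then 1 else 0) := by
    apply List.map_congr_left
    intro i hi
    rw [PySem.List.mem_pyRange_one] at hi
    rw [PySem.List.len_eq] at hi
    exact pv_AwinIss_count research n k i c hn hi.1 (by omega)
  rw [hmap, pv_sum_map_ite_nat]
  unfold pvWcount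
  rw [PySem.List.len_eq] at *
  exact pv_reindex (research.length : Int) n hn (fun i => pvWinQ research n k i c)

-- ---- B-side characterisation ----

theorem pv_qual_get (research : List String) (k : Int) (i : Int)
    (h0 : 0 ≤ i) (hL : i < (research.length : Int)) :
    PySem.List.pyGetD (research.map (pvQual k)) i []
      = pvQual k (PySem.List.pyGetD research i "") := by
  rw [PySem.List.pyGetD_of_nonneg (h := h0), PySem.List.pyGetD_of_nonneg (h := h0)]
  rw [List.getD_eq_getElem _ _ (by simp; omega), List.getD_eq_getElem _ _ (by omega)]
  simp

theorem pv_qual_sum_snd (k : Int) (d : String) (c : Char) :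
    (((pvQual k d).filter (fun p => p.1 == c)).map Prod.snd).sum = pvDv k d c := by
  rw [pv_qual_filter_eq]; unfold pvDv
  by_cases h : pvDb k d c <;> simp [h]

theorem pv_qual_sum_negsnd (k : Int) (d : String) (c : Char) :
    (((pvQual k d).filter (fun p => p.1 == c)).map (fun p => -p.2)).sum = -(pvDv k d c) := by
  rw [pv_qual_filter_eq]; unfold pvDv
  by_cases h : pvDb k d c <;> simp [h]

theorem pv_qual_sum_one (k : Int) (d : String) (c : Char) :
    (((pvQual k d).filter (fun p => p.1 == c)).map (fun _ => (1 : Int))).sum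
      = if pvDb k d c then 1 else 0 := by
  rw [pv_qual_filter_eq]
  by_cases h : pvDb k d c <;> simp [h]

theorem pv_qual_sum_negone (k : Int) (d : String) (c : Char) :
    (((pvQual k d).filter (fun p => p.1 == c)).map (fun _ => (-1 : Int))).sum
      = -(if pvDb k d c then 1 else 0) := by
  rw [pv_qual_filter_eq]
  by_cases h : pvDb k d c <;> simp [h]

theorem pv_mem_update (s : PySem.Set Char) (l : List Char) (y : Char) :
    y ∈ PySem.Set.update s l ↔ y ∈ s ∨ y ∈ l := by
  have h := PySem.Set.mem_foldl_add l (fun x => x) s y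
  constructor
  · intro hy
    rcases h.mp hy with h' | ⟨b, hb, rfl⟩
    · exact Or.inl h'
    · exact Or.inr hb
  · intro hy
    apply h.mpr
    rcases hy with h' | h'
    · exact Or.inl h'
    · exact Or.inr ⟨y, h', rfl⟩

theorem pv_count_filter_nodup (s : List Char) (h : s.Nodup) (p : Char → Bool) (c : Char) :
    (s.filter p).count c = if c ∈ s ∧ p c then 1 else 0 := by
  by_cases hp : p c
  · rw [List.count_filter hp]
    by_cases hm : c ∈ s
    · simp [hm, hp, List.count_eq_one_of_mem h hm]
    · simp [hm, List.count_eq_zero_of_not_mem hm]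
  · rw [List.count_eq_zero_of_not_mem (fun hmem => hp (List.of_mem_filter hmem))]
    simp [hp]

theorem pv_Binv (research : List String) (n k : Int) (hn : 1 ≤ n) (m : Nat)
    (hm : (m : Int) ≤ (research.length : Int)) :
    (∀ c, ((PySem.List.pyRange 0 (m : Int) 1).foldl (pvBstep (research.map (pvQual k)) n k)
        (PySem.Dict.empty, PySem.Dict.empty, PySem.Dict.empty)).1.getD c 0
        = pvQsum research k (max 0 ((m : Int) - n)) (m : Int) c)
    ∧ (∀ c, ((PySem.List.pyRange 0 (m : Int) 1).foldl (pvBstep (research.map (pvQual k)) n k)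
        (PySem.Dict.empty, PySem.Dict.empty, PySem.Dict.empty)).2.1.getD c 0
        = (pvQcnt research k (max 0 ((m : Int) - n)) (m : Int) c : Int))
    ∧ (∀ c, (c ∈ ((PySem.List.pyRange 0 (m : Int) 1).foldl (pvBstep (research.map (pvQual k)) n k)
        (PySem.Dict.empty, PySem.Dict.empty, PySem.Dict.empty)).2.1.keys
        ↔ ∃ j : Int, 0 ≤ j ∧ j < (m : Int) ∧ pvQb research k j c = true))
    ∧ ((PySem.List.pyRange 0 (m : Int) 1).foldl (pvBstep (research.map (pvQual k)) n k)
        (PySem.Dict.empty, PySem.Dict.empty, PySem.Dict.empty)).2.1.keys.Nodup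
    ∧ (∀ c, ((PySem.List.pyRange 0 (m : Int) 1).foldl (pvBstep (research.map (pvQual k)) n k)
        (PySem.Dict.empty, PySem.Dict.empty, PySem.Dict.empty)).2.2.getD c 0
        = ((PySem.List.pyRange 0 (m : Int) 1).countP
            (fun i => decide (n - 1 ≤ i) && pvWinQ research n k i c) : Int))
    ∧ (∀ c, (c ∈ ((PySem.List.pyRange 0 (m : Int) 1).foldl (pvBstep (research.map (pvQual k)) n k)
        (PySem.Dict.empty, PySem.Dict.empty, PySem.Dict.empty)).2.2.keys
        ↔ ∃ i : Int, 0 ≤ i ∧ i < (m : Int) ∧ n - 1 ≤ i ∧ pvWinQ research n k i c = true))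
    ∧ ((PySem.List.pyRange 0 (m : Int) 1).foldl (pvBstep (research.map (pvQual k)) n k)
        (PySem.Dict.empty, PySem.Dict.empty, PySem.Dict.empty)).2.2.keys.Nodup := by
  induction m with
  | zero =>
    simp only [Nat.cast_zero, PySem.List.pyRange_zero, List.foldl_nil]
    refine ⟨?_, ?_, ?_, ?_, ?_, ?_, ?_⟩
    · intro c
      unfold pvQsum
      rw [show max 0 ((0:Int) - n) = 0 by omega, PySem.List.pyRange_zero]
      simp [PySem.Dict.getD_empty]
    · intro c
      unfold pvQcnt
      rw [show max 0 ((0:Int) - n) = 0 by omega, PySem.List.pyRange_zero]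
      simp [PySem.Dict.getD_empty]
    · intro c
      simp [PySem.Dict.keys_empty]
      intro j h1 h2
      omega
    · simp [PySem.Dict.keys_empty]
    · intro c
      simp [PySem.Dict.getD_empty]
    · intro c
      simp [PySem.Dict.keys_empty]
      intro j h1 h2
      omega
    · simp [PySem.Dict.keys_empty]
  | succ m ih =>
    have h0m : (0:Int) ≤ (m:Int) := by positivity
    have hmL : (m:Int) < (research.length : Int) := by push_cast at hm ⊢; omega
    obtain ⟨ih1, ih2, ih3, ih4, ih5, ih6, ih7⟩ := ih (by omega)
    have hsplit : PySem.List.pyRange 0 ((m+1 : Nat) : Int) 1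
        = PySem.List.pyRange 0 (m : Int) 1 ++ [(m : Int)] := by
      push_cast
      exact PySem.List.pyRange_one_succ_right h0m
    rw [hsplit, List.foldl_append, List.foldl_cons, List.foldl_nil]
    set prev := (PySem.List.pyRange 0 (m : Int) 1).foldl (pvBstep (research.map (pvQual k)) n k)
        (PySem.Dict.empty, PySem.Dict.empty, PySem.Dict.empty) with hprev
    -- names for the day data
    have hq := pv_qual_get research k (m : Int) h0m hmL
    set dm := PySem.List.pyGetD research (m : Int) "" with hdm
    -- the state after the additive pass
    have haddsplit : ((PySem.List.pyGetD (research.map (pvQual k)) (m:Int) []).foldl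
        (fun (td : PySem.Dict Char Int × PySem.Dict Char Int) p =>
          (td.1.modify p.1 0 (· + p.2), td.2.modify p.1 0 (· + 1)))
        (prev.1, prev.2.1))
        = ((pvQual k dm).foldl (fun d p => d.modify p.1 0 (· + p.2)) prev.1,
           (pvQual k dm).foldl (fun d p => d.modify p.1 0 (· + 1)) prev.2.1) := by
      rw [hq]
      exact PySem.List.foldl_prod_mk (fun d p => d.modify p.1 0 (· + p.2))
        (fun d p => d.modify p.1 0 (· + 1)) (pvQual k dm) prev.1 prev.2.1
    set T1 := (pvQual k dm).foldl (fun d p => d.modify p.1 0 (· + p.2)) prev.1 with hT1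
    set D1 := (pvQual k dm).foldl (fun d p => d.modify p.1 0 (· + 1)) prev.2.1 with hD1
    have hdb_m : ∀ c, pvDb k dm c = pvQb research k (m : Int) c := fun c => rfl
    have hdv_m : ∀ c, pvDv k dm c = pvQv research k (m : Int) c := fun c => rfl
    have hA1 : ∀ c, T1.getD c 0
        = pvQsum research k (max 0 ((m:Int) - n)) (m:Int) c + pvQv research k (m:Int) c := by
      intro c
      rw [hT1, pv_getD_foldl_modify_add (pvQual k dm) Prod.fst Prod.snd prev.1 c,
        pv_qual_sum_snd, ih1, hdv_m]
    have hA2 : ∀ c, D1.getD c 0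
        = (pvQcnt research k (max 0 ((m:Int) - n)) (m:Int) c : Int)
          + (if pvQb research k (m:Int) c then 1 else 0) := by
      intro c
      rw [hD1, pv_getD_foldl_modify_add (pvQual k dm) Prod.fst (fun _ => (1:Int)) prev.2.1 c,
        pv_qual_sum_one, ih2, hdb_m]
    have hA2k : ∀ c, c ∈ D1.keys
        ↔ (∃ j : Int, 0 ≤ j ∧ j < (m:Int) ∧ pvQb research k j c = true)
          ∨ pvQb research k (m:Int) c = true := by
      intro c
      rw [hD1, PySem.Dict.keys_foldl_modify_key (pvQual k dm) Prod.fst 0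
        (fun _ p => (· + 1)) prev.2.1]
      rw [pv_mem_update, pv_mem_map_fst_qual, ih3, hdb_m]
    have hA2nd : D1.keys.Nodup := by
      rw [hD1]
      exact PySem.Dict.nodup_keys_foldl_modify_key _ _ _ _ _ ih4
    -- the three final components as goals over the step value
    by_cases hrem : n ≤ (m:Int)
    · -- a day falls out of the window
      have heval : n - 1 ≤ (m:Int) := by omega
      have h0r : (0:Int) ≤ (m:Int) - n := by omega
      have hqr := pv_qual_get research k ((m:Int) - n) h0r (by omega)
      set dr := PySem.List.pyGetD research ((m:Int) - n) "" with hdr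
      have hdb_r : ∀ c, pvDb k dr c = pvQb research k ((m:Int) - n) c := fun c => rfl
      have hdv_r : ∀ c, pvDv k dr c = pvQv research k ((m:Int) - n) c := fun c => rfl
      set T2 := (pvQual k dr).foldl (fun d p => d.modify p.1 0 (· - p.2)) T1 with hT2
      set D2 := (pvQual k dr).foldl (fun d p => d.modify p.1 0 (· - 1)) D1 with hD2
      have hB1 : ∀ c, T2.getD c 0
          = pvQsum research k (max 0 ((m:Int) + 1 - n)) ((m:Int) + 1) c := by
        intro c
        have hsub : T2 = (pvQual k dr).foldl (fun d p => d.modify p.1 0 (· + (-p.2))) T1 := by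
          rw [hT2]; simp only [sub_eq_add_neg]
        rw [hsub]
        rw [pv_getD_foldl_modify_add (pvQual k dr) Prod.fst (fun p => -p.2) T1 c,
          pv_qual_sum_negsnd, hA1, hdv_r]
        have e1 : max 0 ((m:Int) - n) = (m:Int) - n := by omega
        have e2 : max 0 ((m:Int) + 1 - n) = (m:Int) + 1 - n := by omega
        rw [e1, e2]
        have r1 := pv_qsum_cons research k ((m:Int) - n) (m:Int) c (by omega)
        have r2 := pv_qsum_succ research k ((m:Int) + 1 - n) (m:Int) c (by omega)
        have e3 : (m:Int) - n + 1 = (m:Int) + 1 - n := by ring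
        rw [e3] at r1
        omega
      have hB2 : ∀ c, D2.getD c 0
          = (pvQcnt research k (max 0 ((m:Int) + 1 - n)) ((m:Int) + 1) c : Int) := by
        intro c
        have hsub : D2 = (pvQual k dr).foldl (fun d p => d.modify p.1 0 (· + (-1))) D1 := by
          rw [hD2]; simp only [sub_eq_add_neg]
        rw [hsub]
        rw [pv_getD_foldl_modify_add (pvQual k dr) Prod.fst (fun _ => (-1:Int)) D1 c,
          pv_qual_sum_negone, hA2, hdb_r]
        have e1 : max 0 ((m:Int) - n) = (m:Int) - n := by omega
        have e2 : max 0 ((m:Int) + 1 - n) = (m:Int) + 1 - n := by omega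
        rw [e1, e2]
        have r1 := pv_qcnt_cons research k ((m:Int) - n) (m:Int) c (by omega)
        have r2 := pv_qcnt_succ research k ((m:Int) + 1 - n) (m:Int) c (by omega)
        have e3 : (m:Int) - n + 1 = (m:Int) + 1 - n := by ring
        rw [e3] at r1
        by_cases h1 : pvQb research k ((m:Int) - n) c <;>
          by_cases h2 : pvQb research k (m:Int) c <;>
            simp [h1, h2] at r1 r2 ⊢ <;> push_cast [r1, r2] <;> omega
      have hB2k : ∀ c, c ∈ D2.keys
          ↔ (∃ j : Int, 0 ≤ j ∧ j < (m:Int) + 1 ∧ pvQb research k j c = true) := by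
        intro c
        rw [hD2, PySem.Dict.keys_foldl_modify_key (pvQual k dr) Prod.fst 0
          (fun _ p => (· - 1)) D1]
        rw [pv_mem_update, pv_mem_map_fst_qual, hA2k, hdb_r]
        constructor
        · rintro ((⟨j, h1, h2, h3⟩ | h) | h)
          · exact ⟨j, h1, by omega, h3⟩
          · exact ⟨(m:Int), by omega, by omega, h⟩
          · exact ⟨(m:Int) - n, by omega, by omega, h⟩
        · rintro ⟨j, h1, h2, h3⟩
          by_cases hj : j < (m:Int)
          · exact Or.inl (Or.inl ⟨j, h1, hj, h3⟩)
          · left; right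
            have : j = (m:Int) := by omega
            rwa [this] at h3
      have hB2nd : D2.keys.Nodup := by
        rw [hD2]
        exact PySem.Dict.nodup_keys_foldl_modify_key _ _ _ _ _ hA2nd
      -- the evaluation pass
      have hwinq : ∀ c, ((c ∈ D2.keys) ∧ (n ≤ D2.getD c 0 ∧ 2 * n * k ≤ T2.getD c 0))
          ↔ pvWinQ research n k (m:Int) c = true := by
        intro c
        unfold pvWinQ
        have e2 : max 0 ((m:Int) + 1 - n) = (m:Int) + 1 - n := by omega
        rw [hB1 c, hB2 c, e2]
        simp only [Bool.and_eq_true, decide_eq_true_eq]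
        constructor
        · rintro ⟨_, h⟩; exact h
        · intro h
          refine ⟨?_, h⟩
          obtain ⟨j, h1, h2, h3⟩ := pv_winq_inhabit research n k (m:Int) c hn heval
            (by unfold pvWinQ; simp only [Bool.and_eq_true, decide_eq_true_eq]; exact h)
          exact (hB2k c).mpr ⟨j, h1, h2, h3⟩
      have hW : ∀ c, (D2.keys.foldl
          (fun (w : PySem.Dict Char Int) c =>
            if n ≤ D2.getD c 0 ∧ 2 * n * k ≤ T2.getD c 0 then w.modify c 0 (· + 1) else w)
          prev.2.2).getD c 0
          = ((PySem.List.pyRange 0 ((m:Int) + 1) 1).countP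
              (fun i => decide (n - 1 ≤ i) && pvWinQ research n k i c) : Int) := by
        intro c
        rw [pv_getD_foldl_modify_if D2.keys
          (fun c => n ≤ D2.getD c 0 ∧ 2 * n * k ≤ T2.getD c 0) prev.2.2 c, ih5]
        rw [pv_count_filter_nodup _ hB2nd]
        rw [PySem.List.pyRange_one_succ_right h0m, List.countP_append]
        simp only [List.countP_cons, List.countP_nil]
        have : (decide (n - 1 ≤ (m:Int)) && pvWinQ research n k (m:Int) c)
            = decide ((c ∈ D2.keys) ∧ (n ≤ D2.getD c 0 ∧ 2 * n * k ≤ T2.getD c 0)) := by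
          rw [show decide (n - 1 ≤ (m:Int)) = true by simpa using heval]
          rw [Bool.true_and]
          by_cases h : pvWinQ research n k (m:Int) c = true
          · rw [h]; symm; simpa using (hwinq c).mpr h
          · rw [Bool.eq_false_iff.mpr h]  -- pvWinQ = false
            symm
            simp only [decide_eq_false_iff_not]
            intro hc
            exact h ((hwinq c).mp hc)
        rw [this]
        by_cases h : (c ∈ D2.keys) ∧ (n ≤ D2.getD c 0 ∧ 2 * n * k ≤ T2.getD c 0) <;>
          simp [h] <;> push_cast <;> omega
      have hWk : ∀ c, (c ∈ (D2.keys.foldl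
          (fun (w : PySem.Dict Char Int) c =>
            if n ≤ D2.getD c 0 ∧ 2 * n * k ≤ T2.getD c 0 then w.modify c 0 (· + 1) else w)
          prev.2.2).keys)
          ↔ ∃ i : Int, 0 ≤ i ∧ i < (m:Int) + 1 ∧ n - 1 ≤ i ∧ pvWinQ research n k i c = true := by
        intro c
        rw [pv_mem_keys_foldl_modify_if D2.keys
          (fun c => n ≤ D2.getD c 0 ∧ 2 * n * k ≤ T2.getD c 0) prev.2.2 c, ih6]
        constructor
        · rintro (⟨i, h1, h2, h3, h4⟩ | h)
          · exact ⟨i, h1, by omega, h3, h4⟩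
          · exact ⟨(m:Int), by omega, by omega, heval, (hwinq c).mp h⟩
        · rintro ⟨i, h1, h2, h3, h4⟩
          by_cases hi : i < (m:Int)
          · exact Or.inl ⟨i, h1, hi, h3, h4⟩
          · right
            have : i = (m:Int) := by omega
            rw [this] at h4
            exact (hwinq c).mpr h4
      have hWnd : (D2.keys.foldl
          (fun (w : PySem.Dict Char Int) c =>
            if n ≤ D2.getD c 0 ∧ 2 * n * k ≤ T2.getD c 0 then w.modify c 0 (· + 1) else w)
          prev.2.2).keys.Nodup :=
        pv_nodup_keys_foldl_modify_if _ _ _ ih7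
      -- assemble
      have hstep : pvBstep (research.map (pvQual k)) n k prev (m:Int)
          = (T2, D2, D2.keys.foldl
              (fun (w : PySem.Dict Char Int) c =>
                if n ≤ D2.getD c 0 ∧ 2 * n * k ≤ T2.getD c 0 then w.modify c 0 (· + 1) else w)
              prev.2.2) := by
        simp only [pvBstep]
        rw [haddsplit, if_pos hrem, if_pos heval]
        simp only [hqr]
        rw [PySem.List.foldl_prod_mk (fun d p => d.modify p.1 0 (· - p.2))
          (fun d p => d.modify p.1 0 (· - 1)) (pvQual k dr) T1 D1]
      rw [hstep, ← hsplit]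
      push_cast
      exact ⟨hB1, hB2, hB2k, hB2nd, hW, hWk, hWnd⟩
    · -- no removal
      have hmax : max 0 ((m:Int) + 1 - n) = 0 := by omega
      have hmax0 : max 0 ((m:Int) - n) = 0 := by omega
      have hB1 : ∀ c, T1.getD c 0
          = pvQsum research k (max 0 ((m:Int) + 1 - n)) ((m:Int) + 1) c := by
        intro c
        rw [hA1, hmax0, hmax, pv_qsum_succ research k 0 (m:Int) c h0m]
      have hB2 : ∀ c, D1.getD c 0
          = (pvQcnt research k (max 0 ((m:Int) + 1 - n)) ((m:Int) + 1) c : Int) := by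
        intro c
        rw [hA2, hmax0, hmax, pv_qcnt_succ research k 0 (m:Int) c h0m]
        by_cases h : pvQb research k (m:Int) c <;> simp [h]
      have hB2k : ∀ c, c ∈ D1.keys
          ↔ (∃ j : Int, 0 ≤ j ∧ j < (m:Int) + 1 ∧ pvQb research k j c = true) := by
        intro c
        rw [hA2k]
        constructor
        · rintro (⟨j, h1, h2, h3⟩ | h)
          · exact ⟨j, h1, by omega, h3⟩
          · exact ⟨(m:Int), by omega, by omega, h⟩
        · rintro ⟨j, h1, h2, h3⟩
          by_cases hj : j < (m:Int)
          · exact Or.inl ⟨j, h1, hj, h3⟩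
          · right
            have : j = (m:Int) := by omega
            rwa [this] at h3
      by_cases heval : n - 1 ≤ (m:Int)
      · have hwinq : ∀ c, ((c ∈ D1.keys) ∧ (n ≤ D1.getD c 0 ∧ 2 * n * k ≤ T1.getD c 0))
            ↔ pvWinQ research n k (m:Int) c = true := by
          intro c
          unfold pvWinQ
          have e2 : (m:Int) + 1 - n = 0 := by omega
          rw [hB1 c, hB2 c, hmax, e2]
          simp only [Bool.and_eq_true, decide_eq_true_eq]
          constructor
          · rintro ⟨_, h⟩; exact h
          · intro h
            refine ⟨?_, h⟩
            obtain ⟨j, h1, h2, h3⟩ := pv_winq_inhabit research n k (m:Int) c hn heval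
              (by unfold pvWinQ; rw [e2]; simp only [Bool.and_eq_true, decide_eq_true_eq]; exact h)
            exact (hB2k c).mpr ⟨j, h1, h2, h3⟩
        have hW : ∀ c, (D1.keys.foldl
            (fun (w : PySem.Dict Char Int) c =>
              if n ≤ D1.getD c 0 ∧ 2 * n * k ≤ T1.getD c 0 then w.modify c 0 (· + 1) else w)
            prev.2.2).getD c 0
            = ((PySem.List.pyRange 0 ((m:Int) + 1) 1).countP
                (fun i => decide (n - 1 ≤ i) && pvWinQ research n k i c) : Int) := by
          intro c
          rw [pv_getD_foldl_modify_if D1.keys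
            (fun c => n ≤ D1.getD c 0 ∧ 2 * n * k ≤ T1.getD c 0) prev.2.2 c, ih5]
          rw [pv_count_filter_nodup _ hA2nd]
          rw [PySem.List.pyRange_one_succ_right h0m, List.countP_append]
          simp only [List.countP_cons, List.countP_nil]
          have : (decide (n - 1 ≤ (m:Int)) && pvWinQ research n k (m:Int) c)
              = decide ((c ∈ D1.keys) ∧ (n ≤ D1.getD c 0 ∧ 2 * n * k ≤ T1.getD c 0)) := by
            rw [show decide (n - 1 ≤ (m:Int)) = true by simpa using heval]
            rw [Bool.true_and]
            by_cases h : pvWinQ research n k (m:Int) c = true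
            · rw [h]; symm; simpa using (hwinq c).mpr h
            · rw [Bool.eq_false_iff.mpr h]
              symm
              simp only [decide_eq_false_iff_not]
              intro hc
              exact h ((hwinq c).mp hc)
          rw [this]
          by_cases h : (c ∈ D1.keys) ∧ (n ≤ D1.getD c 0 ∧ 2 * n * k ≤ T1.getD c 0) <;>
            simp [h] <;> push_cast <;> omega
        have hWk : ∀ c, (c ∈ (D1.keys.foldl
            (fun (w : PySem.Dict Char Int) c =>
              if n ≤ D1.getD c 0 ∧ 2 * n * k ≤ T1.getD c 0 then w.modify c 0 (· + 1) else w)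
            prev.2.2).keys)
            ↔ ∃ i : Int, 0 ≤ i ∧ i < (m:Int) + 1 ∧ n - 1 ≤ i ∧ pvWinQ research n k i c = true := by
          intro c
          rw [pv_mem_keys_foldl_modify_if D1.keys
            (fun c => n ≤ D1.getD c 0 ∧ 2 * n * k ≤ T1.getD c 0) prev.2.2 c, ih6]
          constructor
          · rintro (⟨i, h1, h2, h3, h4⟩ | h)
            · exact ⟨i, h1, by omega, h3, h4⟩
            · exact ⟨(m:Int), by omega, by omega, heval, (hwinq c).mp h⟩
          · rintro ⟨i, h1, h2, h3, h4⟩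
            by_cases hi : i < (m:Int)
            · exact Or.inl ⟨i, h1, hi, h3, h4⟩
            · right
              have : i = (m:Int) := by omega
              rw [this] at h4
              exact (hwinq c).mpr h4
        have hWnd : (D1.keys.foldl
            (fun (w : PySem.Dict Char Int) c =>
              if n ≤ D1.getD c 0 ∧ 2 * n * k ≤ T1.getD c 0 then w.modify c 0 (· + 1) else w)
            prev.2.2).keys.Nodup :=
          pv_nodup_keys_foldl_modify_if _ _ _ ih7
        have hstep : pvBstep (research.map (pvQual k)) n k prev (m:Int)
            = (T1, D1, D1.keys.foldl
                (fun (w : PySem.Dict Char Int) c =>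
                  if n ≤ D1.getD c 0 ∧ 2 * n * k ≤ T1.getD c 0 then w.modify c 0 (· + 1) else w)
                prev.2.2) := by
          simp only [pvBstep]
          rw [haddsplit, if_neg hrem, if_pos heval]
        rw [hstep, ← hsplit]
        push_cast
        exact ⟨hB1, hB2, hB2k, hA2nd, hW, hWk, hWnd⟩
      · -- no evaluation either
        have hW : ∀ c, prev.2.2.getD c 0
            = ((PySem.List.pyRange 0 ((m:Int) + 1) 1).countP
                (fun i => decide (n - 1 ≤ i) && pvWinQ research n k i c) : Int) := by
          intro c
          rw [ih5, PySem.List.pyRange_one_succ_right h0m, List.countP_append]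
          simp only [List.countP_cons, List.countP_nil]
          rw [show decide (n - 1 ≤ (m:Int)) = false by simpa using heval]
          simp
        have hWk : ∀ c, (c ∈ prev.2.2.keys)
            ↔ ∃ i : Int, 0 ≤ i ∧ i < (m:Int) + 1 ∧ n - 1 ≤ i ∧ pvWinQ research n k i c = true := by
          intro c
          rw [ih6]
          constructor
          · rintro ⟨i, h1, h2, h3, h4⟩
            exact ⟨i, h1, by omega, h3, h4⟩
          · rintro ⟨i, h1, h2, h3, h4⟩
            refine ⟨i, h1, ?_, h3, h4⟩
            omega
        have hstep : pvBstep (research.map (pvQual k)) n k prev (m:Int)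
            = (T1, D1, prev.2.2) := by
          simp only [pvBstep]
          rw [haddsplit, if_neg hrem, if_neg heval]
        rw [hstep, ← hsplit]
        push_cast
        exact ⟨hB1, hB2, hB2k, hA2nd, hW, hWk, ih7⟩

-- ---- final-phase equality ----

theorem pv_finalize (I : List Char) (w : PySem.Dict Char Int)
    (hc : ∀ c, (I.count c : Int) = w.getD c 0)
    (hm : ∀ c, c ∈ I ↔ c ∈ w.keys) (hnd : w.keys.Nodup) :
    ((PySem.List.sorted (PySem.Set.ofList (PySem.List.sorted I (fun x => x))) (fun x => x)).foldl
      (fun (am : String × Int) i =>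
        if am.2 < ((PySem.List.sorted I (fun x => x)).count i : Int)
        then (String.ofList [i], ((PySem.List.sorted I (fun x => x)).count i : Int)) else am)
      ("None", 0)).1
    = ((PySem.List.sorted w.keys (fun x => x)).foldl
      (fun (am : String × Int) c =>
        if am.2 < w.getD c 0 then (String.ofList [c], w.getD c 0) else am)
      ("None", 0)).1 := by
  have hSp : (PySem.List.sorted I (fun x => x)).Perm I := PySem.List.sorted_perm I (fun x => x) false
  have hlists : PySem.List.sorted (PySem.Set.ofList (PySem.List.sorted I (fun x => x))) (fun x => x)
      = PySem.List.sorted w.keys (fun x => x) := by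
    apply PySem.List.sorted_eq_sorted_of_perm _ _ _ (fun a b h => h)
    rw [List.perm_ext_iff_of_nodup (PySem.Set.nodup_ofList _) hnd]
    intro c
    rw [PySem.Set.mem_ofList, hSp.mem_iff, hm]
  rw [hlists]
  congr 1
  apply PySem.List.foldl_congr_mem
  intro acc x _
  rw [hSp.count_eq, hc]

-- ===== VERDICT (by name: the statement is the Claim_ definition above) =====
theorem solution_spec : Claim_equal_solution := by
  unfold Claim_equal_solution
  intro research n k _ hpre
  have hn : 1 ≤ n := hpre
  unfold Spec_solution solution solution_alt
  simp only [PySem.List.len_eq]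
  -- the B-side invariant at m = research.length
  have hinv := pv_Binv research n k hn research.length (by simp)
  obtain ⟨_, _, _, _, hW, hWk, hWnd⟩ := hinv
  -- the A-side count, restated over ↑research.length
  have hAcount : ∀ c, (((PySem.List.pyRange 0 ((research.length : Int) - n + 1) 1).foldl
      (pvAstep research n k) ([], PySem.Dict.empty, [])).1).count c = pvWcount research n k c := by
    intro c
    have := pv_A_count research n k c hn
    rwa [PySem.List.len_eq] at this
  have hWc : ∀ c, pvWcount research n k c
      = (PySem.List.pyRange 0 ((research.length : Int)) 1).countP
          (fun i => decide (n - 1 ≤ i) && pvWinQ research n k i c) := by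
    intro c
    unfold pvWcount
    rw [PySem.List.len_eq]
  apply pv_finalize
  · intro c
    rw [hAcount c, hWc c, hW c]
  · intro c
    rw [hWk c]
    rw [List.count_pos_iff.symm, hAcount c, hWc c]
    rw [show (0 < (PySem.List.pyRange 0 ((research.length : Int)) 1).countP
        (fun i => decide (n - 1 ≤ i) && pvWinQ research n k i c))
      ↔ _ from List.countP_pos_iff]
    constructor
    · rintro ⟨i, hi, hp⟩
      rw [PySem.List.mem_pyRange_one] at hi
      simp only [Bool.and_eq_true, decide_eq_true_eq] at hp
      exact ⟨i, hi.1, hi.2, hp.1, hp.2⟩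
    · rintro ⟨i, h1, h2, h3, h4⟩
      refine ⟨i, ?_, ?_⟩
      · rw [PySem.List.mem_pyRange_one]; exact ⟨h1, h2⟩
      · simp only [Bool.and_eq_true, decide_eq_true_eq]; exact ⟨h3, h4⟩
  · exact hWnd
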